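-- pv_equiv track=rewrite | github.com/ajn2004/group_raiding | app/db/models/schedule.py | bin2days
-- ===== SOURCE A (Python) =====
-- def bin2days(binNumber: int = 0) -> list[int]:
--     days = []
--
--     for i in range(7):
--         # indexing through days where sun = 0 sat = 6
--         day_bit = binNumber & 1
--         days.append(day_bit)
--         binNumber >>= 1
--     days.reverse()
--     return days
-- ===== SOURCE B (Python) =====
-- def bin2days(binNumber: int = 0) -> list[int]:
--     return [1 if c == '1' else 0 for c in format(binNumber % 128, '07b')]
-- ===== Notes on version B (the rewrite author's own statement) =====
-- stated objective: idiomatic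
-- what changed: Replaces the 7-step shift/mask loop with append and final reverse by a single expression: reduce mod 128 once, format as a zero-padded 7-char binary string (already MSB-first), and map each character to 0/1.
import Mathlib
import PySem

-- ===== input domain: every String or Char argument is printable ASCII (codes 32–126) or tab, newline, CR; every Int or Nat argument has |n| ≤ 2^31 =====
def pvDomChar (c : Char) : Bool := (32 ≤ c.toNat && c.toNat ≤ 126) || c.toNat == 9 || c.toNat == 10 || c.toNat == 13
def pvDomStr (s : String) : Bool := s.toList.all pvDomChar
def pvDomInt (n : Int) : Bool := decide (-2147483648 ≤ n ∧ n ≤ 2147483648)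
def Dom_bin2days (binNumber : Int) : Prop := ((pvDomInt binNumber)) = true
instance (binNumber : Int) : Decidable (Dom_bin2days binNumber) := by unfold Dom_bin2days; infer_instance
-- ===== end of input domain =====

-- B replaces A's 7-step shift/mask loop + reverse by formatting (n % 128) as a
-- zero-padded 7-char binary string and mapping its characters to 0/1 (idiomatic).


-- ===== PORT A =====
-- for i in range(7): days.append(n & 1); n >>= 1; then days.reverse()
def bin2days (binNumber : Int) : List Int :=
  let st := (PySem.List.pyRange 0 7 1).foldl
    (fun (st : List Int × Int) _ =>
      let day_bit := PySem.Int.band st.2 1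
      (st.1 ++ [day_bit], st.2 >>> (1:Nat)))
    ([], binNumber)
  st.1.reverse

-- ===== PORT B =====
-- format(m, '07b') for 0 ≤ m < 128: binary digits of m left-padded with '0' to 7 chars
def bin2days_altFmt7 (m : Int) : List Char :=
  let ds := PySem.Int.toBinChars m
  List.replicate (7 - ds.length) '0' ++ ds

def bin2days_alt (binNumber : Int) : List Int :=
  (bin2days_altFmt7 (PySem.Int.mod binNumber 128)).map
    (fun c => if c = '1' then (1 : Int) else 0)

-- ===== PRECONDITION & SPEC =====
def Spec_bin2days (binNumber : Int) (out : List Int) : Prop := out = bin2days_alt binNumber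
instance (binNumber : Int) (out : List Int) : Decidable (Spec_bin2days binNumber out) := by unfold Spec_bin2days; infer_instance

-- ===== CLAIM (what is proved, stated in full; the proofs are below) =====
def Claim_equal_bin2days : Prop := ∀ (binNumber : Int), Dom_bin2days binNumber → Spec_bin2days binNumber (bin2days binNumber)

-- ===== LEMMAS AND PROOFS =====

-- A's result depends only on binNumber mod 128
theorem bin2days_mod (n : Int) : bin2days n = bin2days (n % 128) := by
  have hr : PySem.List.pyRange 0 7 1 = [0,1,2,3,4,5,6] := by decide
  simp only [bin2days, hr, List.foldl_cons, List.foldl_nil, PySem.Int.band_one,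
    PySem.Int.mod_eq_emod_of_pos (by norm_num : (0:Int) < 2), Int.shiftRight_eq_div_pow]
  norm_num
  omega

-- B's result depends only on binNumber mod 128
theorem bin2days_alt_mod (n : Int) : bin2days_alt n = bin2days_alt (n % 128) := by
  simp only [bin2days_alt, PySem.Int.mod_eq_emod_of_pos (by norm_num : (0:Int) < 128)]
  rw [Int.emod_emod_of_dvd _ (by norm_num)]

-- agreement on the 128 residues
theorem bin2days_fin : ∀ r : Fin 128, bin2days ((r : Nat) : Int) = bin2days_alt ((r : Nat) : Int) := by
  decide

-- ===== VERDICT (by name: the statement is the Claim_ definition above) =====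
theorem bin2days_spec : Claim_equal_bin2days := by
  intro n _
  unfold Spec_bin2days
  have h0 : 0 ≤ n % 128 := Int.emod_nonneg n (by norm_num)
  have h1 : n % 128 < 128 := Int.emod_lt_of_pos n (by norm_num)
  have h2 : n % 128 = (((⟨(n % 128).toNat, by omega⟩ : Fin 128) : Nat) : Int) := by simp; omega
  rw [bin2days_mod, bin2days_alt_mod, h2, bin2days_fin]
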